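-- pv_equiv track=rewrite | github.com/vonshednob/metaindexmanager | metaindexmanager/utils.py | parse_key_sequence
-- ===== SOURCE A (Python) =====
-- def parse_key_sequence(text):
--     sequence = []
--
--     pos = 0
--     while pos < len(text):
--         token = text[pos]
--         if token == '<':
--             other = text.find('>', pos)
--             if other < 0:
--                 return None
--             sequence.append(text[pos:other+1])
--             pos = other
--         elif token == '^' and pos < len(text)-1:
--             pos += 1
--             if text[pos] == '^':
--                 sequence.append('^')
--             else:
--                 sequence.append('^' + text[pos])
--         else:
--             sequence.append(token)
--
--         pos += 1
--
--     return tuple(sequence)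
-- ===== SOURCE B (Python) =====
-- def parse_key_sequence(text):
--     sequence = []
--     group = None       # buffered '<...>' token while inside a group
--     pending = False    # a '^' was seen and awaits its companion char
--     for ch in text:
--         if group is not None:
--             group += ch
--             if ch == '>':
--                 sequence.append(group)
--                 group = None
--         elif pending:
--             sequence.append('^' if ch == '^' else '^' + ch)
--             pending = False
--         elif ch == '<':
--             group = ch
--         elif ch == '^':
--             pending = True
--         else:
--             sequence.append(ch)
--     if group is not None:
--         return None
--     if pending:
--         sequence.append('^')
--     return tuple(sequence)
-- ===== Notes on version B (the rewrite author's own statement) =====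
-- stated objective: alternative
-- what changed: Replaces A's index-cursor loop that scans ahead with str.find and slices out each bracketed token by a single for-loop over the characters maintaining a group buffer and a pending-caret flag, flushed at end of input.
import Mathlib
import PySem

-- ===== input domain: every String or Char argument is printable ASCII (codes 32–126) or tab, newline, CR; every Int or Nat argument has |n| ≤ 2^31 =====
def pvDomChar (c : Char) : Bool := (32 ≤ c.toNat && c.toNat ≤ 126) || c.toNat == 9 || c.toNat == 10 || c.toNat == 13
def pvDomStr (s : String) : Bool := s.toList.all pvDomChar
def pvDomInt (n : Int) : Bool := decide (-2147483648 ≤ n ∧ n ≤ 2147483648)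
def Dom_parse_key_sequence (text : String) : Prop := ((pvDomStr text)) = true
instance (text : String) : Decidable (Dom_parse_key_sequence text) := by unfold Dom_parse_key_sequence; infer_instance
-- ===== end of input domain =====

-- B replaces A's index cursor with find/slicing by a single fold over the characters
-- keeping a group buffer and a pending-caret flag (objective: alternative decomposition, same cost).

-- ===== PORT A =====
-- A's while loop over the position cursor, transliterated as recursion over the
-- remaining suffix of the text ('text.find('>', pos)' = first index of '>' in the
-- suffix, none = -1; slices become take/drop of the suffix); tokens are built as
-- List Char and turned into String only at the very end.
def pvLoopA : List Char → List (List Char) → Option (List (List Char))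
  | [], acc => some acc
  | c :: rest, acc =>
    if c = '<' then
      match List.idxOf? '>' (c :: rest) with
      | none => none
      | some j => pvLoopA ((c :: rest).drop (j + 1)) (acc ++ [(c :: rest).take (j + 1)])
    else if c = '^' then
      match rest with
      | d :: rest' => pvLoopA rest' (acc ++ [if d = '^' then ['^'] else ['^', d]])
      | [] => pvLoopA [] (acc ++ [[c]])   -- '^' at the last position: plain else-branch append
    else pvLoopA rest (acc ++ [[c]])
  termination_by s _ => s.length
  decreasing_by
    all_goals simp [List.length_drop, List.length_cons]

def parse_key_sequence (text : String) : Option (List String) :=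
  (pvLoopA text.toList []).map (List.map String.ofList)

-- ===== PORT B =====
-- state = (tokens so far, open '<...>' group buffer if any, pending-caret flag)
def pvStepB (st : List (List Char) × Option (List Char) × Bool) (ch : Char) :
    List (List Char) × Option (List Char) × Bool :=
  match st with
  | (acc, some g, p) =>
      if ch = '>' then (acc ++ [g ++ [ch]], none, p) else (acc, some (g ++ [ch]), p)
  | (acc, none, p) =>
      if p then (acc ++ [if ch = '^' then ['^'] else ['^', ch]], none, false)
      else if ch = '<' then (acc, some [ch], false)
      else if ch = '^' then (acc, none, true)
      else (acc ++ [[ch]], none, false)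

-- the end-of-loop flush: an open group means failure, a pending caret yields '^'
def pvPostB : List (List Char) × Option (List Char) × Bool → Option (List (List Char))
  | (_, some _, _) => none
  | (acc, none, p) => some (if p then acc ++ [['^']] else acc)

def parse_key_sequence_alt (text : String) : Option (List String) :=
  (pvPostB (text.toList.foldl pvStepB ([], none, false))).map (List.map String.ofList)

-- ===== PRECONDITION & SPEC =====
def Spec_parse_key_sequence (text : String) (out : Option (List String)) : Prop := out = parse_key_sequence_alt text
instance (text : String) (out : Option (List String)) : Decidable (Spec_parse_key_sequence text out) := by unfold Spec_parse_key_sequence; infer_instance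

-- ===== CLAIM (what is proved, stated in full; the proofs are below) =====
def Claim_equal_parse_key_sequence : Prop := ∀ (text : String), Dom_parse_key_sequence text → Spec_parse_key_sequence text (parse_key_sequence text)

-- ===== LEMMAS AND PROOFS =====

-- While the group buffer is open and no '>' arrives, the fold only grows the buffer.
theorem pv_grp_none (rest : List Char) (acc : List (List Char)) (g : List Char) (p : Bool)
    (h : '>' ∉ rest) :
    ∃ g', List.foldl pvStepB (acc, some g, p) rest = (acc, some g', p) := by
  induction rest generalizing g with
  | nil => exact ⟨g, rfl⟩
  | cons d rest ih =>
    simp only [List.mem_cons, not_or] at h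
    simp only [List.foldl_cons, pvStepB]
    rw [if_neg (show ¬ d = '>' from fun hd => h.1 hd.symm)]
    exact ih (g ++ [d]) h.2

-- When the first '>' of the remaining text is at index j, the open group closes
-- after consuming take (j+1), and the fold resumes with no group on drop (j+1).
theorem pv_grp_some (rest : List Char) (acc : List (List Char)) (g : List Char) (p : Bool)
    (j : Nat) (h : List.idxOf? '>' rest = some j) :
    List.foldl pvStepB (acc, some g, p) rest =
      List.foldl pvStepB (acc ++ [g ++ rest.take (j + 1)], none, p) (rest.drop (j + 1)) := by
  induction rest generalizing g acc j with
  | nil => simp [List.idxOf?] at h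
  | cons d rest ih =>
    rw [List.idxOf?_cons] at h
    by_cases hd : d = '>'
    · simp only [hd, beq_self_eq_true, if_pos] at h
      cases h
      simp [pvStepB, hd]
    · simp only [beq_iff_eq, if_neg hd] at h
      cases hj : List.idxOf? '>' rest with
      | none => simp [hj] at h
      | some j' =>
        rw [hj] at h
        simp only [Option.map_some] at h
        cases h
        simp only [List.foldl_cons, pvStepB, if_neg hd, List.take_succ_cons, List.drop_succ_cons]
        rw [ih _ _ _ hj]
        simp

theorem pv_key : ∀ (n : Nat) (s : List Char), s.length ≤ n → ∀ acc,
    pvPostB (List.foldl pvStepB (acc, none, false) s) = pvLoopA s acc := by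
  intro n
  induction n with
  | zero =>
    intro s hs acc
    have : s = [] := List.eq_nil_of_length_eq_zero (Nat.le_zero.mp hs)
    subst this; simp [pvLoopA, pvPostB]
  | succ n ih =>
    intro s hs acc
    cases s with
    | nil => simp [pvLoopA, pvPostB]
    | cons c rest =>
      by_cases hc : c = '<'
      · subst hc
        rw [pvLoopA.eq_def]
        simp only [List.foldl_cons]
        have hstep : pvStepB (acc, none, false) '<' = (acc, some ['<'], false) := by
          simp [pvStepB]
        rw [hstep, List.idxOf?_cons]
        simp only [show (('<' : Char) == '>') = false from rfl, Bool.false_eq_true, if_false]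
        cases hj : List.idxOf? '>' rest with
        | none =>
          have hnotin : '>' ∉ rest := by
            intro hmem
            rcases List.isSome_idxOf?.mpr hmem with h
            rw [hj] at h; simp at h
          obtain ⟨g', hg⟩ := pv_grp_none rest acc ['<'] false hnotin
          rw [hg]; simp [pvPostB]
        | some j =>
          rw [pv_grp_some rest acc ['<'] false j hj]
          simp only [Option.map_some]
          have hlen : (rest.drop (j + 1)).length ≤ n := by
            simp only [List.length_drop]
            simp only [List.length_cons] at hs
            omega
          rw [ih _ hlen]
          simp [List.take_succ_cons, List.drop_succ_cons]
      · by_cases hcar : c = '^'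
        · subst hcar
          rw [pvLoopA.eq_def]
          simp only [if_neg hc, List.foldl_cons]
          have hstep : pvStepB (acc, none, false) '^' = (acc, none, true) := by
            simp [pvStepB]
          rw [hstep]
          cases rest with
          | nil => simp [pvPostB, pvLoopA]
          | cons d rest' =>
            simp only [List.foldl_cons]
            have hstep2 : pvStepB (acc, none, true) d =
                (acc ++ [if d = '^' then ['^'] else ['^', d]], none, false) := by
              simp [pvStepB]
            rw [hstep2]
            have hlen : rest'.length ≤ n := by
              simp only [List.length_cons] at hs; omega
            exact ih _ hlen _
        · rw [pvLoopA.eq_def]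
          simp only [if_neg hc, if_neg hcar, List.foldl_cons]
          have hstep : pvStepB (acc, none, false) c = (acc ++ [[c]], none, false) := by
            simp [pvStepB, hc, hcar]
          rw [hstep]
          have hlen : rest.length ≤ n := by
            simp only [List.length_cons] at hs; omega
          exact ih _ hlen _

-- ===== VERDICT (by name: the statement is the Claim_ definition above) =====
theorem parse_key_sequence_spec : Claim_equal_parse_key_sequence := by
  intro text _
  unfold Spec_parse_key_sequence parse_key_sequence parse_key_sequence_alt
  rw [pv_key text.toList.length text.toList le_rfl []]
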